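-- pv_equiv track=rewrite | github.com/joe82512/leetcode | 839. Similar String Groups/Solution.py | numSimilarGroups_1
-- ===== SOURCE A (Python) =====
-- def numSimilarGroups_1(strs):
--     r = 0
--     n = len(strs)
--     visit = [0]*n
--     queue = []
--
--     for v in range(n):
--         if (visit[v]): #v as i, if similar 1
--             continue
--         #else
--         visit[v] = 1
--         r += 1
--
--         queue.append(strs[v])
--         while (queue):
--             s = queue.pop(0) #BFS or DFS
--             for i in range(n):
--                 if (visit[i]):
--                     continue
--                 elif (len(s) != len(strs[i])):
--                     continue
--                 #else
--                 # compare string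
--                 different = 0
--                 for j in range(len(strs[i])):
--                     if (s[j]!=strs[i][j]):
--                         different += 1
--                 # differnt result
--                 if (different==0 or different==2):
--                     visit[i] = 1 #v as i, if similar 1
--                     queue.append(strs[i])
--
--     return r
-- ===== SOURCE B (Python) =====
-- def numSimilarGroups_1(strs):
--     n = len(strs)
--
--     def similar(a, b):
--         if len(a) != len(b):
--             return False
--         d = sum(x != y for x, y in zip(a, b))
--         return d == 0 or d == 2
--
--     visited = [False] * n
--     groups = 0
--     for v in range(n):
--         if visited[v]:
--             continue
--         groups += 1
--         visited[v] = True
--         changed = True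
--         while changed:
--             changed = False
--             for i in range(n):
--                 if not visited[i] and any(visited[k] and similar(strs[k], strs[i]) for k in range(n)):
--                     visited[i] = True
--                     changed = True
--     return groups
-- ===== Notes on version B (the rewrite author's own statement) =====
-- stated objective: alternative
-- what changed: Replaces the queue-based BFS over component strings by a fixed-point label saturation: a boolean visited array is repeatedly swept, marking any index similar to an already-visited index, until a sweep makes no change; no queue is maintained and similarity is tested against the visited set rather than popped strings.
import Mathlib
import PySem

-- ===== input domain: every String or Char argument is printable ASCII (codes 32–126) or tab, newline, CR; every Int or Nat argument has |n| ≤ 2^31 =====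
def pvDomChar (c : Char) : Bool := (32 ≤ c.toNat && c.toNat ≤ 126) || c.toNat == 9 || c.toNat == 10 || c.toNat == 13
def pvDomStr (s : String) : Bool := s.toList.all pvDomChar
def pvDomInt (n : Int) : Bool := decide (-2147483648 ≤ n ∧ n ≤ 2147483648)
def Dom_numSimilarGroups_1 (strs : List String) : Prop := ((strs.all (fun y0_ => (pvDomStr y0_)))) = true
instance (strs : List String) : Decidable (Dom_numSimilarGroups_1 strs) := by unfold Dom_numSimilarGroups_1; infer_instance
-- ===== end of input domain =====

-- B replaces A's queue-based BFS by fixed-point saturation sweeps over a boolean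
-- visited array (objective: alternative); return values proved equal on all inputs.

-- ===== PORT A =====
-- character-difference count of A's inner `for j in range(len(strs[i]))` loop
def pvDiffA (s t : List Char) : Nat :=
  (List.range t.length).foldl (fun d j => if s[j]? ≠ t[j]? then d + 1 else d) 0

-- A's `for i in range(n)` scan of one popped queue string s
def pvScanA (strs : List String) (s : String) :
    List Nat → List Int → List String → List Int × List String
  | [], visit, queue => (visit, queue)
  | i :: rest, visit, queue =>
    if visit.getD i 0 ≠ 0 then pvScanA strs s rest visit queue
    else if s.toList.length ≠ ((strs.getD i "").toList).length then
      pvScanA strs s rest visit queue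
    else if pvDiffA s.toList ((strs.getD i "").toList) = 0 ∨
            pvDiffA s.toList ((strs.getD i "").toList) = 2 then
      pvScanA strs s rest (visit.set i 1) (queue ++ [strs.getD i ""])
    else pvScanA strs s rest visit queue

-- A's `while (queue)` loop; fuel only makes the recursion total, it is never
-- exhausted on the calls below (the measure `count 0 + queue length` decreases)
def pvWhileA (strs : List String) : Nat → List Int → List String → List Int
  | _, visit, [] => visit
  | 0, visit, _ => visit
  | fuel + 1, visit, s :: qs =>
    let p := pvScanA strs s (List.range strs.length) visit qs
    pvWhileA strs fuel p.1 p.2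

-- A's outer `for v in range(n)` loop
def pvOuterA (strs : List String) : List Nat → List Int → Int → Int
  | [], _, r => r
  | v :: vs, visit, r =>
    if visit.getD v 0 ≠ 0 then pvOuterA strs vs visit r
    else
      let visit1 := visit.set v 1
      let visit2 := pvWhileA strs (visit1.count 0 + 2) visit1 [strs.getD v ""]
      pvOuterA strs vs visit2 (r + 1)

def numSimilarGroups_1 (strs : List String) : Int :=
  pvOuterA strs (List.range strs.length) (List.replicate strs.length 0) 0

-- ===== PORT B =====
-- B's helper `similar`: zip the two strings and count differing positions
def pvSimilarB (a b : List Char) : Bool :=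
  if a.length ≠ b.length then false
  else
    let d := (a.zip b).countP (fun p => p.1 ≠ p.2)
    d == 0 || d == 2

-- one `for i in range(n)` sweep of B's saturation loop
def pvRoundB (strs : List String) : List Nat → List Bool → Bool → List Bool × Bool
  | [], visited, changed => (visited, changed)
  | i :: rest, visited, changed =>
    if ¬ visited.getD i false ∧ (List.range strs.length).any
        (fun k => visited.getD k false &&
                  pvSimilarB ((strs.getD k "").toList) ((strs.getD i "").toList)) then
      pvRoundB strs rest (visited.set i true) true
    else pvRoundB strs rest visited changed

-- B's `while changed` loop; fuel only makes the recursion total, it is never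
-- exhausted on the calls below (each changed sweep unmarks one `false`)
def pvSatB (strs : List String) : Nat → List Bool → List Bool
  | 0, visited => visited
  | fuel + 1, visited =>
    let p := pvRoundB strs (List.range strs.length) visited false
    if p.2 then pvSatB strs fuel p.1 else p.1

-- B's outer `for v in range(n)` loop
def pvOuterB (strs : List String) : List Nat → List Bool → Int → Int
  | [], _, groups => groups
  | v :: vs, visited, groups =>
    if visited.getD v false then pvOuterB strs vs visited groups
    else
      let visited1 := visited.set v true
      let visited2 := pvSatB strs (visited1.count false + 1) visited1
      pvOuterB strs vs visited2 (groups + 1)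

def numSimilarGroups_1_alt (strs : List String) : Int :=
  pvOuterB strs (List.range strs.length) (List.replicate strs.length false) 0

-- ===== PRECONDITION & SPEC =====
def Spec_numSimilarGroups_1 (strs : List String) (out : Int) : Prop := out = numSimilarGroups_1_alt strs
instance (strs : List String) (out : Int) : Decidable (Spec_numSimilarGroups_1 strs out) := by unfold Spec_numSimilarGroups_1; infer_instance

-- ===== CLAIM (what is proved, stated in full; the proofs are below) =====
def Claim_equal_numSimilarGroups_1 : Prop := ∀ (strs : List String), Dom_numSimilarGroups_1 strs → Spec_numSimilarGroups_1 strs (numSimilarGroups_1 strs)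

-- ===== LEMMAS AND PROOFS =====

-- marked-set views of the two mutable arrays
def pvMA (a : List Int) (i : Nat) : Prop := a.getD i 0 ≠ 0
def pvMB (b : List Bool) (i : Nat) : Prop := b.getD i false = true

-- index-level similarity (B's predicate on the two stored strings)
def pvAdj (strs : List String) (k i : Nat) : Prop :=
  pvSimilarB ((strs.getD k "").toList) ((strs.getD i "").toList) = true

-- reachability from a start set through the similarity relation: the least
-- superset of S closed under marking similar indices
inductive pvReach (strs : List String) (S : Nat → Prop) : Nat → Prop
  | base {i : Nat} : S i → pvReach strs S i
  | step {k i : Nat} : pvReach strs S k → k < strs.length → i < strs.length →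
      pvAdj strs k i → pvReach strs S i

theorem pvReach_mono (strs : List String) (S T : Nat → Prop)
    (h : ∀ j, S j → pvReach strs T j) {i : Nat} (hi : pvReach strs S i) :
    pvReach strs T i := by
  induction hi with
  | base h0 => exact h _ h0
  | step _ hk hi hadj ih => exact pvReach.step ih hk hi hadj

theorem pvReach_congr (strs : List String) (S T : Nat → Prop)
    (h : ∀ j, S j ↔ T j) {i : Nat} (hi : pvReach strs S i) : pvReach strs T i :=
  pvReach_mono strs S T (fun j hj => pvReach.base ((h j).1 hj)) hi

-- small getD/set/count helpers used throughout
theorem pv_getD_set_self {α : Type} (l : List α) (i : Nat) (x d : α)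
    (h : i < l.length) : (l.set i x).getD i d = x := by
  simp [List.getD_eq_getElem?_getD, List.getElem?_set_self, h]

theorem pv_getD_set_ne {α : Type} (l : List α) (i j : Nat) (x d : α)
    (h : j ≠ i) : (l.set j x).getD i d = l.getD i d := by
  simp [List.getD_eq_getElem?_getD, List.getElem?_set_ne h]

theorem pv_MA_set_mono (a : List Int) (v i : Nat) (h : pvMA a i) :
    pvMA (a.set v 1) i := by
  unfold pvMA at h ⊢
  by_cases hvi : v = i
  · subst hvi
    by_cases hlt : v < a.length
    · rw [pv_getD_set_self _ _ _ _ hlt]; simp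
    · rw [List.set_eq_of_length_le (by omega)]; exact h
  · rw [pv_getD_set_ne _ _ _ _ _ hvi]; exact h

theorem pv_MB_set_mono (b : List Bool) (v i : Nat) (h : pvMB b i) :
    pvMB (b.set v true) i := by
  unfold pvMB at h ⊢
  by_cases hvi : v = i
  · subst hvi
    by_cases hlt : v < b.length
    · rw [pv_getD_set_self _ _ _ _ hlt]
    · rw [List.set_eq_of_length_le (by omega)]; exact h
  · rw [pv_getD_set_ne _ _ _ _ _ hvi]; exact h

theorem pv_count0_set (l : List Int) (i : Nat) (h : i < l.length)
    (h0 : l.getD i 0 = 0) : (l.set i 1).count 0 + 1 = l.count 0 := by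
  induction l generalizing i with
  | nil => simp at h
  | cons x xs ih =>
    cases i with
    | zero =>
      simp only [List.getD_cons_zero] at h0
      subst h0
      simp [List.count_cons]
    | succ n =>
      simp only [List.getD_cons_succ] at h0
      have := ih n (by simpa using h) h0
      simp only [List.set_cons_succ, List.count_cons]
      omega

theorem pv_countfalse_set (l : List Bool) (i : Nat) (h : i < l.length)
    (h0 : l.getD i false = false) : (l.set i true).count false + 1 = l.count false := by
  induction l generalizing i with
  | nil => simp at h
  | cons x xs ih =>
    cases i with
    | zero =>
      simp only [List.getD_cons_zero] at h0
      subst h0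
      simp [List.count_cons]
    | succ n =>
      simp only [List.getD_cons_succ] at h0
      have := ih n (by simpa using h) h0
      simp only [List.set_cons_succ, List.count_cons]
      omega

theorem pv_countfalse_set_le (l : List Bool) (i : Nat) :
    (l.set i true).count false ≤ l.count false := by
  induction l generalizing i with
  | nil => simp
  | cons x xs ih =>
    cases i with
    | zero => simp [List.count_cons]
    | succ n =>
      simp only [List.set_cons_succ, List.count_cons]
      have := ih n
      omega

theorem pvReach_elim (strs : List String) (S P : Nat → Prop)
    (h0 : ∀ j, S j → P j)
    (hc : ∀ k i, k < strs.length → i < strs.length → P k → pvAdj strs k i → P i)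
    {i : Nat} (h : pvReach strs S i) : P i := by
  induction h with
  | base hb => exact h0 _ hb
  | step _ hk hi hadj ih => exact hc _ _ hk hi ih hadj

-- ---- the two similarity predicates agree ----

theorem pv_foldl_ite_count {α : Type} (p : α → Prop) [DecidablePred p]
    (l : List α) (c : Nat) :
    l.foldl (fun d j => if p j then d + 1 else d) c = c + l.countP (fun j => decide (p j)) := by
  induction l generalizing c with
  | nil => simp
  | cons x xs ih =>
    by_cases h : p x <;> simp [List.countP_cons, h, ih] <;> omega

theorem pvDiffA_eq_countP (s t : List Char) :
    pvDiffA s t = (List.range t.length).countP (fun j => decide (s[j]? ≠ t[j]?)) := by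
  simpa [pvDiffA] using pv_foldl_ite_count (fun j => s[j]? ≠ t[j]?) (List.range t.length) 0

theorem pv_countP_range_zip (s t : List Char) (h : s.length = t.length) :
    (List.range t.length).countP (fun j => decide (s[j]? ≠ t[j]?))
      = (s.zip t).countP (fun p => decide (p.1 ≠ p.2)) := by
  induction t generalizing s with
  | nil => simp
  | cons y ys ih =>
    cases s with
    | nil => simp at h
    | cons x xs =>
      have hlen : xs.length = ys.length := by simpa using h
      simp only [List.length_cons, List.range_succ_eq_map, List.countP_cons,
        List.zip_cons_cons, List.countP_map]
      have : ((List.range ys.length).countP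
          (fun j => decide ((x :: xs)[j.succ]? ≠ (y :: ys)[j.succ]?)))
          = (List.range ys.length).countP (fun j => decide (xs[j]? ≠ ys[j]?)) := by
        apply List.countP_congr
        intro j _
        simp
      simp only [Function.comp_def] at *
      rw [this, ih xs hlen]
      simp [List.countP_cons]

theorem pvSim_bridge (s t : String) :
    (¬ s.toList.length ≠ t.toList.length ∧
      (pvDiffA s.toList t.toList = 0 ∨ pvDiffA s.toList t.toList = 2))
      ↔ pvSimilarB s.toList t.toList = true := by
  unfold pvSimilarB
  by_cases hl : s.toList.length = t.toList.length
  · rw [if_neg (by omega : ¬ s.toList.length ≠ t.toList.length)]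
    rw [pvDiffA_eq_countP, pv_countP_range_zip _ _ hl]
    simp only [Bool.or_eq_true, beq_iff_eq]
    constructor
    · exact fun h => h.2
    · exact fun h => ⟨by omega, h⟩
  · rw [if_pos (by omega : s.toList.length ≠ t.toList.length)]
    constructor
    · rintro ⟨h, -⟩
      exact (hl (not_not.mp h)).elim
    · intro h
      simp at h

-- ---- lemmas about A's scan ----

theorem pvScanA_len (strs : List String) (s : String) (idxs : List Nat)
    (visit : List Int) (queue : List String) :
    (pvScanA strs s idxs visit queue).1.length = visit.length := by
  induction idxs generalizing visit queue with
  | nil => rfl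
  | cons i rest ih =>
    simp only [pvScanA]
    split_ifs <;> simp [ih]

theorem pvScanA_mono (strs : List String) (s : String) (idxs : List Nat)
    (visit : List Int) (queue : List String) (i : Nat) (h : pvMA visit i) :
    pvMA (pvScanA strs s idxs visit queue).1 i := by
  induction idxs generalizing visit queue with
  | nil => exact h
  | cons j rest ih =>
    simp only [pvScanA]
    split_ifs with h1 h2 h3
    · exact ih _ _ h
    · exact ih _ _ h
    · apply ih
      unfold pvMA at h ⊢
      by_cases hij : i = j
      · subst hij
        by_cases hlt : i < visit.length
        · simp [List.getD_eq_getElem?_getD, List.getElem?_set_self, hlt]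
        · simp_all [List.getD_eq_getElem?_getD, List.getElem?_eq_none (by omega : visit.length ≤ i)]
      · simp [List.getD_eq_getElem?_getD, List.getElem?_set_ne (by omega : j ≠ i), h]
        simpa [List.getD_eq_getElem?_getD] using h
    · exact ih _ _ h

theorem pvScanA_sound (strs : List String) (s : String) (idxs : List Nat)
    (visit : List Int) (queue : List String) (i : Nat)
    (h : pvMA (pvScanA strs s idxs visit queue).1 i) :
    pvMA visit i ∨ (i ∈ idxs ∧ pvSimilarB s.toList ((strs.getD i "").toList) = true) := by
  induction idxs generalizing visit queue with
  | nil => exact Or.inl h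
  | cons j rest ih =>
    simp only [pvScanA] at h
    split_ifs at h with h1 h2 h3
    · rcases ih _ _ h with h2 | ⟨hm, hs⟩
      · exact Or.inl h2
      · exact Or.inr ⟨List.mem_cons_of_mem _ hm, hs⟩
    · rcases ih _ _ h with h3 | ⟨hm, hs⟩
      · exact Or.inl h3
      · exact Or.inr ⟨List.mem_cons_of_mem _ hm, hs⟩
    · rcases ih _ _ h with h4 | ⟨hm, hs⟩
      · by_cases hij : i = j
        · subst hij
          exact Or.inr ⟨List.mem_cons_self, (pvSim_bridge s (strs.getD i "")).1 ⟨h2, h3⟩⟩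
        · left
          unfold pvMA at h4 ⊢
          rwa [pv_getD_set_ne _ _ _ _ _ (fun hji => hij hji.symm)] at h4
      · exact Or.inr ⟨List.mem_cons_of_mem _ hm, hs⟩
    · rcases ih _ _ h with h4 | ⟨hm, hs⟩
      · exact Or.inl h4
      · exact Or.inr ⟨List.mem_cons_of_mem _ hm, hs⟩

theorem pvScanA_complete (strs : List String) (s : String) (idxs : List Nat)
    (visit : List Int) (queue : List String) (i : Nat)
    (hi : i ∈ idxs) (hlen : i < visit.length)
    (hsim : pvSimilarB s.toList ((strs.getD i "").toList) = true) :
    pvMA (pvScanA strs s idxs visit queue).1 i := by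
  induction idxs generalizing visit queue with
  | nil => simp at hi
  | cons j rest ih =>
    simp only [pvScanA]
    rcases List.mem_cons.mp hi with hij | hmem
    · subst hij
      split_ifs with h1 h2 h3
      · exact pvScanA_mono _ _ _ _ _ _ h1
      · exact (((pvSim_bridge s (strs.getD i "")).2 hsim).1 h2).elim
      · apply pvScanA_mono
        unfold pvMA
        rw [pv_getD_set_self _ _ _ _ hlen]
        simp
      · exact (h3 ((pvSim_bridge s (strs.getD i "")).2 hsim).2).elim
    · split_ifs with h1 h2 h3
      · exact ih _ _ hmem hlen
      · exact ih _ _ hmem hlen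
      · exact ih _ _ hmem (by simpa using hlen)
      · exact ih _ _ hmem hlen

theorem pvScanA_queue_mono (strs : List String) (s : String) (idxs : List Nat)
    (visit : List Int) (queue : List String) (t : String) (h : t ∈ queue) :
    t ∈ (pvScanA strs s idxs visit queue).2 := by
  induction idxs generalizing visit queue with
  | nil => exact h
  | cons j rest ih =>
    simp only [pvScanA]
    split_ifs with h1 h2 h3
    · exact ih _ _ h
    · exact ih _ _ h
    · exact ih _ _ (List.mem_append_left _ h)
    · exact ih _ _ h

theorem pvScanA_queue_char (strs : List String) (s : String) (idxs : List Nat)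
    (visit : List Int) (queue : List String) (t : String)
    (hidx : ∀ i ∈ idxs, i < visit.length)
    (h : t ∈ (pvScanA strs s idxs visit queue).2) :
    t ∈ queue ∨ ∃ i, i ∈ idxs ∧ strs.getD i "" = t ∧
      pvMA (pvScanA strs s idxs visit queue).1 i := by
  induction idxs generalizing visit queue with
  | nil => exact Or.inl h
  | cons j rest ih =>
    have hjlen : j < visit.length := hidx j List.mem_cons_self
    have hidx2 : ∀ i ∈ rest, i < visit.length := fun i hi => hidx i (List.mem_cons_of_mem _ hi)
    simp only [pvScanA] at h ⊢
    split_ifs at h ⊢ with h1 h2 h3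
    · rcases ih _ _ hidx2 h with h4 | ⟨i, hi, he, hm⟩
      · exact Or.inl h4
      · exact Or.inr ⟨i, List.mem_cons_of_mem _ hi, he, hm⟩
    · rcases ih _ _ hidx2 h with h4 | ⟨i, hi, he, hm⟩
      · exact Or.inl h4
      · exact Or.inr ⟨i, List.mem_cons_of_mem _ hi, he, hm⟩
    · rcases ih _ _ (by simpa using hidx2) h with h4 | ⟨i, hi, he, hm⟩
      · rcases List.mem_append.mp h4 with hq | hx
        · exact Or.inl hq
        · refine Or.inr ⟨j, List.mem_cons_self, (List.mem_singleton.mp hx).symm, ?_⟩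
          apply pvScanA_mono
          unfold pvMA
          rw [pv_getD_set_self _ _ _ _ hjlen]
          simp
      · exact Or.inr ⟨i, List.mem_cons_of_mem _ hi, he, hm⟩
    · rcases ih _ _ hidx2 h with h4 | ⟨i, hi, he, hm⟩
      · exact Or.inl h4
      · exact Or.inr ⟨i, List.mem_cons_of_mem _ hi, he, hm⟩

theorem pvScanA_new_in_queue (strs : List String) (s : String) (idxs : List Nat)
    (visit : List Int) (queue : List String) (i : Nat)
    (h0 : ¬ pvMA visit i) (h1 : pvMA (pvScanA strs s idxs visit queue).1 i) :
    strs.getD i "" ∈ (pvScanA strs s idxs visit queue).2 := by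
  induction idxs generalizing visit queue with
  | nil => exact (h0 h1).elim
  | cons j rest ih =>
    simp only [pvScanA] at h1 ⊢
    split_ifs at h1 ⊢ with hc1 hc2 hc3
    · exact ih _ _ h0 h1
    · exact ih _ _ h0 h1
    · by_cases hij : i = j
      · subst hij
        exact pvScanA_queue_mono _ _ _ _ _ _
          (List.mem_append_right _ (List.mem_singleton.mpr rfl))
      · apply ih _ _ _ h1
        unfold pvMA at h0 ⊢
        rwa [pv_getD_set_ne _ _ _ _ _ (fun hji => hij hji.symm)]
    · exact ih _ _ h0 h1

theorem pvScanA_measure (strs : List String) (s : String) (idxs : List Nat)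
    (visit : List Int) (queue : List String)
    (h : ∀ i ∈ idxs, i < visit.length) :
    (pvScanA strs s idxs visit queue).1.count 0 + (pvScanA strs s idxs visit queue).2.length
      ≤ visit.count 0 + queue.length := by
  induction idxs generalizing visit queue with
  | nil => simp [pvScanA]
  | cons j rest ih =>
    have hjlen : j < visit.length := h j List.mem_cons_self
    have h2 : ∀ i ∈ rest, i < visit.length := fun i hi => h i (List.mem_cons_of_mem _ hi)
    simp only [pvScanA]
    split_ifs with hc1 hc2 hc3
    · exact ih _ _ h2
    · exact ih _ _ h2
    · have hset := pv_count0_set visit j hjlen (by omega)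
      have hrec := ih (visit.set j 1) (queue ++ [strs.getD j ""]) (by simpa using h2)
      simp only [List.length_append, List.length_singleton] at hrec
      omega
    · exact ih _ _ h2

-- ---- A's while loop computes exactly the reachable set ----

theorem pvWhileA_spec (strs : List String) (fuel : Nat) (visit : List Int)
    (queue : List String)
    (hlen : visit.length = strs.length)
    (hfuel : visit.count 0 + queue.length ≤ fuel)
    (hQ1 : ∀ t ∈ queue, ∃ k, k < strs.length ∧ pvMA visit k ∧ strs.getD k "" = t)
    (hQ2 : ∀ k, k < strs.length → pvMA visit k →
      strs.getD k "" ∈ queue ∨ ∀ i, i < strs.length → pvAdj strs k i → pvMA visit i) :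
    (pvWhileA strs fuel visit queue).length = strs.length ∧
    (∀ i, pvMA visit i → pvMA (pvWhileA strs fuel visit queue) i) ∧
    (∀ i, pvMA (pvWhileA strs fuel visit queue) i → pvReach strs (pvMA visit) i) ∧
    (∀ k i, k < strs.length → i < strs.length →
      pvMA (pvWhileA strs fuel visit queue) k → pvAdj strs k i →
      pvMA (pvWhileA strs fuel visit queue) i) := by
  induction fuel generalizing visit queue with
  | zero =>
    cases queue with
    | nil =>
      simp only [pvWhileA]
      refine ⟨hlen, fun i h => h, fun i h => pvReach.base h, ?_⟩
      intro k i hk hi hmk hadj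
      rcases hQ2 k hk hmk with hq | hcl
      · simp at hq
      · exact hcl i hi hadj
    | cons s qs =>
      exfalso
      simp only [List.length_cons] at hfuel
      omega
  | succ f ih =>
    cases queue with
    | nil =>
      simp only [pvWhileA]
      refine ⟨hlen, fun i h => h, fun i h => pvReach.base h, ?_⟩
      intro k i hk hi hmk hadj
      rcases hQ2 k hk hmk with hq | hcl
      · simp at hq
      · exact hcl i hi hadj
    | cons s qs =>
      have hidx : ∀ i ∈ List.range strs.length, i < visit.length := by
        intro i hi
        rw [hlen]
        exact List.mem_range.mp hi
      obtain ⟨ks, hks, hmks, hkeq⟩ := hQ1 s List.mem_cons_self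
      set p := pvScanA strs s (List.range strs.length) visit qs with hp
      have hlen1 : p.1.length = strs.length := by
        rw [hp, pvScanA_len, hlen]
      have hmeas : List.count 0 p.1 + p.2.length ≤ List.count 0 visit + qs.length :=
        pvScanA_measure strs s (List.range strs.length) visit qs hidx
      -- p.1 is included in what is reachable from visit
      have hsub : ∀ j, pvMA p.1 j → pvReach strs (pvMA visit) j := by
        intro j hj
        rcases pvScanA_sound strs s _ visit qs j hj with hv | ⟨hjm, hjs⟩
        · exact pvReach.base hv
        · refine pvReach.step (pvReach.base hmks) hks (List.mem_range.mp hjm) ?_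
          unfold pvAdj
          rw [hkeq]
          exact hjs
      have hQ1' : ∀ t ∈ p.2, ∃ k, k < strs.length ∧ pvMA p.1 k ∧ strs.getD k "" = t := by
        intro t ht
        rcases pvScanA_queue_char strs s _ visit qs t hidx ht with htq | ⟨i, hi, he, hm⟩
        · obtain ⟨k, hk, hmk, hke⟩ := hQ1 t (List.mem_cons_of_mem _ htq)
          exact ⟨k, hk, pvScanA_mono _ _ _ _ _ _ hmk, hke⟩
        · exact ⟨i, List.mem_range.mp hi, hm, he⟩
      have hQ2' : ∀ k, k < strs.length → pvMA p.1 k →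
          strs.getD k "" ∈ p.2 ∨ ∀ i, i < strs.length → pvAdj strs k i → pvMA p.1 i := by
        intro k hk hmk
        by_cases hm : pvMA visit k
        · rcases hQ2 k hk hm with hq | hcl
          · rcases List.mem_cons.mp hq with hqs | hqs
            · right
              intro i hi hadj
              apply pvScanA_complete strs s _ visit qs i (List.mem_range.mpr hi)
                (by rw [hlen]; exact hi)
              unfold pvAdj at hadj
              rwa [hqs] at hadj
            · exact Or.inl (pvScanA_queue_mono _ _ _ _ _ _ hqs)
          · right
            intro i hi hadj
            exact pvScanA_mono _ _ _ _ _ _ (hcl i hi hadj)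
        · exact Or.inl (pvScanA_new_in_queue strs s _ visit qs k hm hmk)
      have hfuel2 : List.count 0 p.1 + p.2.length ≤ f := by
        simp only [List.length_cons] at hfuel
        omega
      have hrec := ih p.1 p.2 hlen1 hfuel2 hQ1' hQ2'
      have hstep : pvWhileA strs (f + 1) visit (s :: qs) = pvWhileA strs f p.1 p.2 := by
        simp only [pvWhileA]
        rw [hp]
      rw [hstep]
      refine ⟨hrec.1, ?_, ?_, hrec.2.2.2⟩
      · intro i h
        exact hrec.2.1 i (pvScanA_mono _ _ _ _ _ _ h)
      · intro i h
        exact pvReach_mono strs (pvMA p.1) (pvMA visit) hsub (hrec.2.2.1 i h)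

-- ---- lemmas about B's sweep ----

theorem pvRoundB_len (strs : List String) (idxs : List Nat)
    (visited : List Bool) (ch : Bool) :
    (pvRoundB strs idxs visited ch).1.length = visited.length := by
  induction idxs generalizing visited ch with
  | nil => rfl
  | cons j rest ih =>
    simp only [pvRoundB]
    split_ifs
    · rw [ih]; simp
    · rw [ih]

theorem pvRoundB_mono (strs : List String) (idxs : List Nat)
    (visited : List Bool) (ch : Bool) (i : Nat) (h : pvMB visited i) :
    pvMB (pvRoundB strs idxs visited ch).1 i := by
  induction idxs generalizing visited ch with
  | nil => exact h
  | cons j rest ih =>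
    simp only [pvRoundB]
    split_ifs
    · exact ih _ _ (pv_MB_set_mono _ _ _ h)
    · exact ih _ _ h

theorem pvRoundB_sound (strs : List String) (idxs : List Nat)
    (visited : List Bool) (ch : Bool) (T : Nat → Prop)
    (hT0 : ∀ i, pvMB visited i → T i)
    (hTc : ∀ k i, k < strs.length → i < strs.length → T k → pvAdj strs k i → T i)
    (hin : ∀ i ∈ idxs, i < strs.length) (i : Nat)
    (h : pvMB (pvRoundB strs idxs visited ch).1 i) : T i := by
  induction idxs generalizing visited ch with
  | nil => exact hT0 i h
  | cons j rest ih =>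
    simp only [pvRoundB] at h
    split_ifs at h with h1
    · refine ih (visited.set j true) true ?_ (fun i hi => hin i (List.mem_cons_of_mem _ hi)) h
      intro i' hi'
      by_cases hij : i' = j
      · subst hij
        obtain ⟨k, hkmem, hkp⟩ := List.any_eq_true.mp h1.2
        rw [Bool.and_eq_true] at hkp
        exact hTc k i' (List.mem_range.mp hkmem) (hin i' List.mem_cons_self)
          (hT0 k hkp.1) hkp.2
      · apply hT0
        unfold pvMB at hi' ⊢
        rwa [pv_getD_set_ne _ _ _ _ _ (fun hji => hij hji.symm)] at hi'
    · exact ih _ _ hT0 (fun i hi => hin i (List.mem_cons_of_mem _ hi)) h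

theorem pvRoundB_ch_true (strs : List String) (idxs : List Nat)
    (visited : List Bool) :
    (pvRoundB strs idxs visited true).2 = true := by
  induction idxs generalizing visited with
  | nil => rfl
  | cons j rest ih =>
    simp only [pvRoundB]
    split_ifs
    · exact ih _
    · exact ih _

theorem pvRoundB_false (strs : List String) (idxs : List Nat)
    (visited : List Bool) (ch : Bool)
    (hres : (pvRoundB strs idxs visited ch).2 = false) :
    (pvRoundB strs idxs visited ch).1 = visited ∧
    ∀ i ∈ idxs, pvMB visited i ∨
      ∀ k, k < strs.length → ¬ (pvMB visited k ∧ pvAdj strs k i) := by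
  induction idxs generalizing visited ch with
  | nil => exact ⟨rfl, by simp⟩
  | cons j rest ih =>
    simp only [pvRoundB] at hres ⊢
    split_ifs at hres ⊢ with h1
    · rw [pvRoundB_ch_true strs rest _ ] at hres
      exact absurd hres (by simp)
    · obtain ⟨he, hrest⟩ := ih _ _ hres
      refine ⟨he, ?_⟩
      intro i hi
      rcases List.mem_cons.mp hi with hij | hmem
      · subst hij
        by_cases hv : visited.getD i false = true
        · exact Or.inl hv
        · right
          intro k hk ⟨hmk, hadj⟩
          apply h1
          refine ⟨hv, List.any_eq_true.mpr ⟨k, List.mem_range.mpr hk, ?_⟩⟩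
          rw [Bool.and_eq_true]
          exact ⟨hmk, hadj⟩
      · exact hrest i hmem

theorem pvRoundB_count_mono (strs : List String) (idxs : List Nat)
    (visited : List Bool) (ch : Bool) :
    (pvRoundB strs idxs visited ch).1.count false ≤ visited.count false := by
  induction idxs generalizing visited ch with
  | nil => exact le_refl _
  | cons j rest ih =>
    simp only [pvRoundB]
    split_ifs
    · exact le_trans (ih _ _) (pv_countfalse_set_le _ _)
    · exact ih _ _

theorem pvRoundB_changed_measure (strs : List String) (idxs : List Nat)
    (visited : List Bool)
    (hin : ∀ i ∈ idxs, i < visited.length)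
    (hres : (pvRoundB strs idxs visited false).2 = true) :
    (pvRoundB strs idxs visited false).1.count false < visited.count false := by
  induction idxs generalizing visited with
  | nil => simp [pvRoundB] at hres
  | cons j rest ih =>
    simp only [pvRoundB] at hres ⊢
    split_ifs at hres ⊢ with h1
    · have hj : visited.getD j false = false := by
        rcases Bool.eq_false_or_eq_true (visited.getD j false) with h | h
        · exact absurd h h1.1
        · exact h
      have hset := pv_countfalse_set visited j (hin j List.mem_cons_self) hj
      have := pvRoundB_count_mono strs rest (visited.set j true) true
      omega
    · exact ih _ (fun i hi => hin i (List.mem_cons_of_mem _ hi)) hres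

-- ---- B's saturation loop computes exactly the reachable set ----

theorem pvSatB_spec (strs : List String) (fuel : Nat) (visited : List Bool)
    (hlen : visited.length = strs.length)
    (hfuel : visited.count false + 1 ≤ fuel) :
    (pvSatB strs fuel visited).length = strs.length ∧
    (∀ i, pvMB visited i → pvMB (pvSatB strs fuel visited) i) ∧
    (∀ i, pvMB (pvSatB strs fuel visited) i → pvReach strs (pvMB visited) i) ∧
    (∀ k i, k < strs.length → i < strs.length →
      pvMB (pvSatB strs fuel visited) k → pvAdj strs k i →
      pvMB (pvSatB strs fuel visited) i) := by
  induction fuel generalizing visited with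
  | zero => exact absurd hfuel (by omega)
  | succ f ih =>
    simp only [pvSatB]
    set p := pvRoundB strs (List.range strs.length) visited false with hp
    have hinlen : ∀ i ∈ List.range strs.length, i < visited.length := by
      intro i hi
      rw [hlen]
      exact List.mem_range.mp hi
    by_cases hch : p.2 = true
    · rw [if_pos hch]
      have hmeas : p.1.count false < visited.count false :=
        pvRoundB_changed_measure strs _ visited hinlen hch
      have hlen1 : p.1.length = strs.length := by rw [hp, pvRoundB_len, hlen]
      have hrec := ih p.1 hlen1 (by omega)
      have hsub : ∀ j, pvMB p.1 j → pvReach strs (pvMB visited) j := by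
        intro j hj
        exact pvRoundB_sound strs _ visited false (pvReach strs (pvMB visited))
          (fun i hi => pvReach.base hi)
          (fun k i hk hi hTk hadj => pvReach.step hTk hk hi hadj)
          (fun i hi => List.mem_range.mp hi) j hj
      refine ⟨hrec.1, ?_, ?_, hrec.2.2.2⟩
      · intro i h
        exact hrec.2.1 i (pvRoundB_mono _ _ _ _ _ h)
      · intro i h
        exact pvReach_mono strs _ _ hsub (hrec.2.2.1 i h)
    · rw [if_neg hch]
      have hfalse := pvRoundB_false strs _ visited false (by simpa using hch)
      rw [hfalse.1]
      refine ⟨hlen, fun i h => h, fun i h => pvReach.base h, ?_⟩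
      intro k i hk hi hmk hadj
      rcases hfalse.2 i (List.mem_range.mpr hi) with h | h
      · exact h
      · exact absurd ⟨hmk, hadj⟩ (h k hk)

-- ---- outer loops stay in lock-step ----

theorem pvOuter_eq (strs : List String) (vs : List Nat) (visit : List Int)
    (visited : List Bool) (r : Int)
    (hvs : ∀ v ∈ vs, v < strs.length)
    (hlenA : visit.length = strs.length)
    (hlenB : visited.length = strs.length)
    (hrel : ∀ i, pvMA visit i ↔ pvMB visited i)
    (hclosed : ∀ k i, k < strs.length → i < strs.length →
      pvMA visit k → pvAdj strs k i → pvMA visit i) :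
    pvOuterA strs vs visit r = pvOuterB strs vs visited r := by
  induction vs generalizing visit visited r with
  | nil => rfl
  | cons v vs ih =>
    have hv : v < strs.length := hvs v List.mem_cons_self
    have hvs2 : ∀ u ∈ vs, u < strs.length := fun u hu => hvs u (List.mem_cons_of_mem _ hu)
    simp only [pvOuterA, pvOuterB]
    by_cases hm : visit.getD v 0 ≠ 0
    · rw [if_pos hm, if_pos (show visited.getD v false = true from (hrel v).1 hm)]
      exact ih _ _ _ hvs2 hlenA hlenB hrel hclosed
    · have hmb : ¬ visited.getD v false = true := fun hb => hm ((hrel v).2 hb)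
      rw [if_neg hm, if_neg hmb]
      set a1 := visit.set v 1 with ha1
      set b1 := visited.set v true with hb1
      have hlenA1 : a1.length = strs.length := by rw [ha1]; simpa using hlenA
      have hlenB1 : b1.length = strs.length := by rw [hb1]; simpa using hlenB
      have hrel1 : ∀ i, pvMA a1 i ↔ pvMB b1 i := by
        intro i
        by_cases hiv : i = v
        · subst hiv
          unfold pvMA pvMB
          rw [ha1, hb1, pv_getD_set_self _ _ _ _ (by rw [hlenA]; exact hv),
              pv_getD_set_self _ _ _ _ (by rw [hlenB]; exact hv)]
          simp
        · have e1 : a1.getD i 0 = visit.getD i 0 := by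
            rw [ha1, pv_getD_set_ne _ _ _ _ _ (fun h => hiv h.symm)]
          have e2 : b1.getD i false = visited.getD i false := by
            rw [hb1, pv_getD_set_ne _ _ _ _ _ (fun h => hiv h.symm)]
          unfold pvMA pvMB
          rw [e1, e2]
          exact hrel i
      have hma1v : pvMA a1 v := by
        unfold pvMA
        rw [ha1, pv_getD_set_self _ _ _ _ (by rw [hlenA]; exact hv)]
        simp
      have hQ1w : ∀ t ∈ [strs.getD v ""],
          ∃ k, k < strs.length ∧ pvMA a1 k ∧ strs.getD k "" = t := by
        intro t ht
        rw [List.mem_singleton] at ht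
        exact ⟨v, hv, hma1v, ht.symm⟩
      have hQ2w : ∀ k, k < strs.length → pvMA a1 k →
          strs.getD k "" ∈ [strs.getD v ""] ∨
          ∀ i, i < strs.length → pvAdj strs k i → pvMA a1 i := by
        intro k hk hmk
        by_cases hkv : k = v
        · subst hkv
          exact Or.inl (List.mem_singleton.mpr rfl)
        · right
          intro i hi hadj
          have hmvk : pvMA visit k := by
            unfold pvMA at hmk ⊢
            rwa [ha1, pv_getD_set_ne _ _ _ _ _ (fun h => hkv h.symm)] at hmk
          exact pv_MA_set_mono _ _ _ (hclosed k i hk hi hmvk hadj)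
      have hWA := pvWhileA_spec strs (a1.count 0 + 2) a1 [strs.getD v ""] hlenA1
        (by simp only [List.length_singleton]; omega) hQ1w hQ2w
      have hWB := pvSatB_spec strs (b1.count false + 1) b1 hlenB1 (le_refl _)
      set wA := pvWhileA strs (a1.count 0 + 2) a1 [strs.getD v ""] with hwa
      set wB := pvSatB strs (b1.count false + 1) b1 with hwb
      have hrel2 : ∀ i, pvMA wA i ↔ pvMB wB i := by
        intro i
        constructor
        · intro h
          have hr : pvReach strs (pvMB b1) i :=
            pvReach_congr strs _ _ hrel1 (hWA.2.2.1 i h)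
          exact pvReach_elim strs (pvMB b1) (pvMB wB) hWB.2.1 hWB.2.2.2 hr
        · intro h
          have hr : pvReach strs (pvMA a1) i :=
            pvReach_congr strs _ _ (fun j => (hrel1 j).symm) (hWB.2.2.1 i h)
          exact pvReach_elim strs (pvMA a1) (pvMA wA) hWA.2.1 hWA.2.2.2 hr
      exact ih _ _ _ hvs2 hWA.1 hWB.1 hrel2 hWA.2.2.2

-- ===== VERDICT (by name: the statement is the Claim_ definition above) =====
theorem numSimilarGroups_1_spec : Claim_equal_numSimilarGroups_1 := by
  intro strs _
  unfold Spec_numSimilarGroups_1 numSimilarGroups_1 numSimilarGroups_1_alt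
  apply pvOuter_eq
  · intro v hv; simpa using hv
  · simp
  · simp
  · intro i
    unfold pvMA pvMB
    by_cases h : i < strs.length <;>
      simp [List.getD_eq_getElem?_getD, List.getElem?_replicate, h]
  · intro k i _ _ hk _
    exfalso
    unfold pvMA at hk
    by_cases h : k < strs.length <;>
      simp [List.getD_eq_getElem?_getD, List.getElem?_replicate, h] at hk
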